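-- pv_equiv track=rewrite | github.com/poojithayadavalli/Graph | verticesconnwithallother.py | allconnected
-- ===== SOURCE A (Python) =====
-- def allconnected(adj):
--     s=[]
--     for i in range(len(adj)):
--         l=[j for j in range(len(adj))if j!=i]
--         if l==sorted(adj[i]):
--             s.append(str(i+1))
--     if len(s)==0:
--         s=["-1"]
--     return " ".join(s)
-- ===== SOURCE B (Python) =====
-- def allconnected(adj):
--     n = len(adj)
--     mat = []
--     for row in adj:
--         m = [False] * n
--         for j in row:
--             if 0 <= j < n:
--                 m[j] = True
--         mat.append(m)
--     out = []
--     for i in range(n):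
--         if len(adj[i]) == n - 1 and all(mat[i][j] for j in range(n) if j != i):
--             out.append(str(i + 1))
--     return " ".join(out) if out else "-1"
-- ===== Notes on version B (the rewrite author's own statement) =====
-- stated objective: alternative
-- what changed: B builds an n-by-n boolean adjacency matrix in one pass over the edges (guarding out-of-range entries) and then scans each matrix row: vertex i qualifies iff its degree is n-1 and every off-diagonal entry of row i is set, replacing A's per-vertex sort-and-compare with the expected index list.
import Mathlib
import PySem

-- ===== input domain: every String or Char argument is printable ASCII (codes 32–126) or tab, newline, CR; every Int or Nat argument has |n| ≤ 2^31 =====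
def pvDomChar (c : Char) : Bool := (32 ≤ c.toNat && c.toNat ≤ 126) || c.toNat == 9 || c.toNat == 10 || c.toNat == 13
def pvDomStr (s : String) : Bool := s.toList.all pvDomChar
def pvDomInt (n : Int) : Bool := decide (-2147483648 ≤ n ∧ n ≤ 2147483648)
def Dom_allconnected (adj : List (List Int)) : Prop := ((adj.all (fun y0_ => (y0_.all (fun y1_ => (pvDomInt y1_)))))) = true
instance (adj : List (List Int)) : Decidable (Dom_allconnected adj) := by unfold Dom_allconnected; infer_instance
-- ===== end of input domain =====

-- B builds an n×n boolean adjacency matrix in one pass over the edges, then scans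
-- matrix rows (degree n-1 plus all off-diagonal bits set), instead of A's
-- per-vertex sort-and-compare (objective: alternative).

-- ===== PORT A =====
def allconnected (adj : List (List Int)) : String :=
  let n : Int := adj.length
  let s : List String :=
    (PySem.List.pyRange 0 n).foldl (fun s i =>
      let l := (PySem.List.pyRange 0 n).filter (fun j => decide (j ≠ i))
      if l = PySem.List.sorted (PySem.List.pyGetD adj i []) (fun x => x) then
        s ++ [PySem.Int.toStr (i + 1)]
      else s) []
  let s := if s.length = 0 then ["-1"] else s
  PySem.Str.join " " s

-- ===== PORT B =====
-- m = [False]*n; for j in row: if 0<=j<n: m[j]=True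
def pvRowB (n : Int) (row : List Int) : List Bool :=
  row.foldl (fun m j => if 0 ≤ j ∧ j < n then PySem.List.pySetD m j true else m)
    (PySem.List.pyRepeat [false] n)

def allconnected_alt (adj : List (List Int)) : String :=
  let n : Int := adj.length
  let mat : List (List Bool) := adj.foldl (fun mat row => mat ++ [pvRowB n row]) []
  let out : List String :=
    (PySem.List.pyRange 0 n).foldl (fun out i =>
      if ((PySem.List.pyGetD adj i []).length : Int) = n - 1 ∧
         (((PySem.List.pyRange 0 n).filter (fun j => decide (j ≠ i))).all
           (fun j => PySem.List.pyGetD (PySem.List.pyGetD mat i []) j false)) = true then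
        out ++ [PySem.Int.toStr (i + 1)]
      else out) []
  if out = [] then "-1" else PySem.Str.join " " out

-- ===== PRECONDITION & SPEC =====
def Spec_allconnected (adj : List (List Int)) (out : String) : Prop := out = allconnected_alt adj
instance (adj : List (List Int)) (out : String) : Decidable (Spec_allconnected adj out) := by unfold Spec_allconnected; infer_instance

-- ===== CLAIM (what is proved, stated in full; the proofs are below) =====
def Claim_equal_allconnected : Prop := ∀ (adj : List (List Int)), Dom_allconnected adj → Spec_allconnected adj (allconnected adj)

-- ===== LEMMAS AND PROOFS =====

-- The matrix-row fold reads back membership: setting bit k for each in-range k in row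

theorem pv_fold_get (n : Int) (row : List Int) (m : List Bool)
    (hm : (m.length : Int) = n) (j : Int) (hj0 : 0 ≤ j) (hjn : j < n) :
    PySem.List.pyGetD
      (row.foldl (fun m k => if 0 ≤ k ∧ k < n then PySem.List.pySetD m k true else m) m)
      j false = (PySem.List.pyGetD m j false || decide (j ∈ row)) := by
  induction row generalizing m with
  | nil => simp
  | cons k t ih =>
    simp only [List.foldl_cons]
    by_cases hk : 0 ≤ k ∧ k < n
    · rw [if_pos hk, ih _ (by rw [PySem.List.length_pySetD]; exact hm)]
      rw [PySem.List.pySetD_of_nonneg m true hk.1]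
      have hjlen : j < (m.length : Int) := by omega
      rw [PySem.List.pyGetD_eq_getElem m false hj0 hjlen,
          PySem.List.pyGetD_eq_getElem _ false hj0 (by simpa using hjlen)]
      rw [List.getElem_set]
      by_cases hkj : k = j
      · subst hkj; simp
      · have : k.toNat ≠ j.toNat := by omega
        have hjk : j ≠ k := fun h => hkj h.symm
        simp [this, hjk, List.mem_cons]
    · rw [if_neg hk, ih _ hm]
      have hkj : j ≠ k := by omega
      simp [List.mem_cons, hkj]

-- Reading the built row at an in-range index is membership in the original row
theorem pvRowB_get (n : Int) (row : List Int) (j : Int) (hj0 : 0 ≤ j) (hjn : j < n) :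
    PySem.List.pyGetD (pvRowB n row) j false = decide (j ∈ row) := by
  unfold pvRowB
  rw [PySem.List.pyRepeat_singleton]
  rw [pv_fold_get n row _ (by simp; omega) j hj0 hjn]
  rw [PySem.List.pyGetD_eq_getElem _ false hj0 (by simp; omega)]
  simp

-- The per-vertex conditions agree: adj[i] sorts to "all other indices" iff it has
-- length n-1 and contains every other index 0 ≤ j < n, j ≠ i.
theorem pv_cond_iff (row : List Int) (n i : Int) (hi0 : 0 ≤ i) (hin : i < n) :
    ((PySem.List.pyRange 0 n).filter (fun j => decide (j ≠ i)) =
      PySem.List.sorted row (fun x => x)) ↔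
    ((row.length : Int) = n - 1 ∧
      (((PySem.List.pyRange 0 n).filter (fun j => decide (j ≠ i))).all
        (fun j => decide (j ∈ row))) = true) := by
  set l := (PySem.List.pyRange 0 n).filter (fun j => decide (j ≠ i)) with hl
  have hpw : l.Pairwise (· < ·) :=
    (PySem.List.pairwise_lt_pyRange_one 0 n).filter _
  have hnd : l.Nodup := hpw.imp (fun {a b} h => ne_of_lt h)
  have hlen : (l.length : Int) = n - 1 := by
    have hsplit : (l.length + ((PySem.List.pyRange 0 n).filter
        (fun j => !decide (j ≠ i))).length) = (PySem.List.pyRange 0 n).length := by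
      have := (List.filter_append_perm (fun j => decide (j ≠ i)) (PySem.List.pyRange 0 n)).length_eq
      simpa [hl, List.length_append] using this
    have hone : ((PySem.List.pyRange 0 n).filter (fun j => !decide (j ≠ i))).length = 1 := by
      have hmem : i ∈ PySem.List.pyRange 0 n := by
        simp [PySem.List.mem_pyRange_one]; omega
      have hfe : (fun j : Int => !decide (j ≠ i)) = (fun j => j == i) := by
        funext j; by_cases hh : j = i <;> simp [hh]
      rw [hfe]
      have hc : ((PySem.List.pyRange 0 n).filter (fun j => j == i)).length
          = (PySem.List.pyRange 0 n).count i := by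
        simp [List.count_eq_countP, List.countP_eq_length_filter]
      rw [hc, List.count_eq_one_of_mem (PySem.List.nodup_pyRange_one 0 n) hmem]
    have hrange : ((PySem.List.pyRange 0 n).length : Int) = n := by
      rw [PySem.List.length_pyRange_one]; omega
    omega
  constructor
  · intro h
    have hperm : l.Perm row := h ▸ (PySem.List.sorted_perm row (fun x => x) false)
    refine ⟨by rw [← hperm.length_eq]; exact hlen, ?_⟩
    simp only [List.all_eq_true, decide_eq_true_eq]
    exact fun j hj => hperm.mem_iff.mp hj
  · rintro ⟨hlr, hall⟩
    have hsub : l ⊆ row := by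
      intro j hj
      simpa using (List.all_eq_true.mp hall) j hj
    have hsp : l.Subperm row := hnd.subperm hsub
    have hperm : l.Perm row := hsp.perm_of_length_le (by omega)
    exact (PySem.List.sorted_eq_of_perm_of_pairwise_lt row l (fun x => x) hperm hpw).symm

-- Shared tail: A's join-with-sentinel equals B's guarded join
theorem pv_tail (s : List String) :
    PySem.Str.join " " (if s.length = 0 then ["-1"] else s)
      = if s = [] then "-1" else PySem.Str.join " " s := by
  cases s with
  | nil => decide
  | cons h t => simp

-- ===== VERDICT (by name: the statement is the Claim_ definition above) =====
theorem allconnected_spec : Claim_equal_allconnected := by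
  intro adj _
  show allconnected adj = allconnected_alt adj
  simp only [allconnected, allconnected_alt]
  rw [PySem.List.foldl_append_singleton_eq_map]
  simp only [List.nil_append]
  set n : Int := (adj.length : Int) with hn
  have hfold :
      (PySem.List.pyRange 0 n).foldl (fun s i =>
        if (PySem.List.pyRange 0 n).filter (fun j => decide (j ≠ i)) =
            PySem.List.sorted (PySem.List.pyGetD adj i []) (fun x => x) then
          s ++ [PySem.Int.toStr (i + 1)]
        else s) [] =
      (PySem.List.pyRange 0 n).foldl (fun out i =>
        if ((PySem.List.pyGetD adj i []).length : Int) = n - 1 ∧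
           (((PySem.List.pyRange 0 n).filter (fun j => decide (j ≠ i))).all
             (fun j => PySem.List.pyGetD
               (PySem.List.pyGetD (adj.map (pvRowB n)) i []) j false)) = true then
          out ++ [PySem.Int.toStr (i + 1)]
        else out) [] := by
    apply PySem.List.foldl_congr_mem
    intro acc i hi
    have hrg := (PySem.List.mem_pyRange_one).mp hi
    have hmat : PySem.List.pyGetD (adj.map (pvRowB n)) i []
        = pvRowB n (PySem.List.pyGetD adj i []) := by
      rw [PySem.List.pyGetD_eq_getElem (adj.map (pvRowB n)) [] hrg.1 (by simpa using hrg.2),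
          PySem.List.pyGetD_eq_getElem adj [] hrg.1 (by simpa using hrg.2)]
      simp
    rw [hmat]
    have hallIff : ((((PySem.List.pyRange 0 n).filter (fun j => decide (j ≠ i))).all
          (fun j => PySem.List.pyGetD (pvRowB n (PySem.List.pyGetD adj i [])) j false)) = true)
        ↔ ((((PySem.List.pyRange 0 n).filter (fun j => decide (j ≠ i))).all
          (fun j => decide (j ∈ PySem.List.pyGetD adj i []))) = true) := by
      simp only [List.all_eq_true]
      constructor
      · intro h j hj
        have hjr := (PySem.List.mem_pyRange_one).mp (List.mem_of_mem_filter hj)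
        rw [← pvRowB_get n _ j hjr.1 hjr.2]; exact h j hj
      · intro h j hj
        have hjr := (PySem.List.mem_pyRange_one).mp (List.mem_of_mem_filter hj)
        rw [pvRowB_get n _ j hjr.1 hjr.2]; exact h j hj
    exact if_congr ((pv_cond_iff (PySem.List.pyGetD adj i []) n i hrg.1 hrg.2).trans
      (and_congr Iff.rfl hallIff.symm)) rfl rfl
  rw [hfold]
  exact pv_tail _
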